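-- pv_equiv track=rewrite | github.com/jslusarczykk/pythonuczelnia | 09-mock test/p2.py | f
-- ===== SOURCE A (Python) =====
-- def f(arr): #szuka numeru innego niz reszta
--     if(arr[0]!=arr[1]):
--         if(arr[0]!=arr[2]):
--             return arr[0]
--         else:
--             return(arr[1])
--
--     for i in range(1,len(arr)):
--         if arr[i]!=arr[i-1]:
--             return arr[i]
-- ===== SOURCE B (Python) =====
-- def f(arr):
--     common = arr[0] if arr[0] == arr[1] else arr[2]
--     diffs = [x for x in arr if x != common]
--     if diffs:
--         return diffs[0]
-- ===== Notes on version B (the rewrite author's own statement) =====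
-- stated objective: simpler
-- what changed: Replaces A's first-position special-case branches plus consecutive-pair scan (arr[i]!=arr[i-1]) with a fixed reference value (arr[0] if arr[0]==arr[1] else arr[2]), a filter of the whole list against that reference, and taking the head of the filtered list.
-- outside the precondition, e.g. on f([5, 5, 5]): A returns None, B returns None; on f([1]): A raises IndexError, B raises IndexError; on f([0, 1]): A raises IndexError, B raises IndexError
import Mathlib
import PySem

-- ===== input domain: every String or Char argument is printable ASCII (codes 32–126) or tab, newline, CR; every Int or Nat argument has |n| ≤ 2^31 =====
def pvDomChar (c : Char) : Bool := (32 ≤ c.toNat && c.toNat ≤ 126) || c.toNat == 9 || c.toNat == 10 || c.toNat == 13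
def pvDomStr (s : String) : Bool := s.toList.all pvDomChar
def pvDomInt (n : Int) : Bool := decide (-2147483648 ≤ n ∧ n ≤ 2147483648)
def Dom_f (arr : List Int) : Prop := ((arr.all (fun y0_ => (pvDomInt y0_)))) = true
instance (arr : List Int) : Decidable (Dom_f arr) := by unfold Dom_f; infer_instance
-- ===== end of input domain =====

-- B replaces A's head special-case branches and consecutive-pair scan with one
-- fixed reference value, a filter against it, and the head of the filtered list
-- (objective: simpler).

-- ===== PORT A =====
-- the 'for i in range(1,len(arr)): if arr[i]!=arr[i-1]: return arr[i]' loop: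
-- prev carries arr[i-1]; 0 stands for Python's implicit 'return None' (outside Pre_f)
def fGo (prev : Int) : List Int → Int
  | [] => 0
  | x :: xs => if x ≠ prev then x else fGo x xs

def f (arr : List Int) : Int :=
  if arr.getD 0 0 ≠ arr.getD 1 0 then
    if arr.getD 0 0 ≠ arr.getD 2 0 then arr.getD 0 0 else arr.getD 1 0
  else fGo (arr.getD 0 0) (arr.drop 1)

-- ===== PORT B =====
-- B: filter the list against the reference value, return the head of the result;
-- 0 stands for Python's implicit 'return None' on an empty filter (outside Pre_f)
def f_alt (arr : List Int) : Int :=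
  let common := if arr.getD 0 0 = arr.getD 1 0 then arr.getD 0 0 else arr.getD 2 0
  let diffs := arr.filter (fun x => x ≠ common)
  diffs.headD 0

-- ===== PRECONDITION & SPEC =====
-- Pre_f excludes exactly the inputs on which Python A yields no Int: lists of
-- length < 2 (IndexError on arr[1]), lists with arr[0]!=arr[1] of length 2
-- (IndexError on arr[2]), and all-equal lists starting arr[0]==arr[1] (A falls
-- off the end and returns None, which is not an Int).
def Pre_f (arr : List Int) : Prop :=
  2 ≤ arr.length ∧
    (if arr.getD 0 0 = arr.getD 1 0 then ∃ x ∈ arr, x ≠ arr.getD 0 0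
     else 3 ≤ arr.length)

instance (arr : List Int) : Decidable (Pre_f arr) := by unfold Pre_f; infer_instance

def pvWitness_f : List Int := [4, 4, 7]

def Spec_f (arr : List Int) (out : Int) : Prop := out = f_alt arr
instance (arr : List Int) (out : Int) : Decidable (Spec_f arr out) := by unfold Spec_f; infer_instance

-- ===== CLAIM (what is proved, stated in full; the proofs are below) =====
def Claim_equal_f : Prop := ∀ (arr : List Int), Dom_f arr → Pre_f arr → Spec_f arr (f arr)

-- ===== LEMMAS AND PROOFS =====

-- the consecutive-pair scan starting at c computes the head of the filter
-- against c (as long as the scan keeps meeting elements equal to c, its running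
-- comparison value stays c)
theorem fGo_eq_filter_head (c : Int) (l : List Int) :
    fGo c l = (l.filter (fun x => x ≠ c)).headD 0 := by
  induction l generalizing c with
  | nil => rfl
  | cons x xs ih =>
      by_cases h : x = c
      · subst h; simp [fGo, ih]
      · simp [fGo, h]

-- ===== VERDICT (by name: the statement is the Claim_ definition above) =====
theorem f_spec : Claim_equal_f := by
  intro arr _ hpre
  unfold Spec_f
  match arr with
  | [] => exact absurd hpre.1 (by simp)
  | [a] => exact absurd hpre.1 (by simp)
  | a :: b :: rest =>
      by_cases hab : a = b
      · subst hab
        simp [f, f_alt, fGo_eq_filter_head]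
      · have hrest : rest ≠ [] := by
          have h3 := hpre.2
          simp [hab] at h3
          cases rest with
          | nil => simp at h3
          | cons c r => simp
        match rest with
        | [] => exact absurd rfl hrest
        | c :: rest' =>
            by_cases hac : a = c
            · subst hac
              simp [f, f_alt, hab, Ne.symm hab]
            · simp [f, f_alt, hab, hac]
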